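-- pv_equiv track=rewrite | github.com/carnaticlabs/Sangeetha-Grantha | database/for_import/md_to_json.py | ordered_sections
-- ===== SOURCE A (Python) =====
-- CANONICAL_ORDER = [
--     "pallavi",
--     "anupallavi",
--     "charanam",
--     "samashti_charanam",
--     "madhyamakala",
--     "chittaswaram",
--     "swara_sahitya",
-- ]
--
-- def ordered_sections(raw: dict[str, str]) -> dict[str, str]:
--     """Return sections dict with keys in canonical musical order."""
--     result: dict[str, str] = {}
--     for key in CANONICAL_ORDER:
--         if key in raw:
--             result[key] = raw[key]
--     for key, val in raw.items():
--         if key not in result: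
--             result[key] = val
--     return result
-- ===== SOURCE B (Python) =====
-- CANONICAL_ORDER = [
--     "pallavi",
--     "anupallavi",
--     "charanam",
--     "samashti_charanam",
--     "madhyamakala",
--     "chittaswaram",
--     "swara_sahitya",
-- ]
--
-- _RANK = {name: i for i, name in enumerate(CANONICAL_ORDER)}
--
--
-- def ordered_sections(raw: dict[str, str]) -> dict[str, str]:
--     """Return sections dict with keys in canonical musical order."""
--     sentinel = len(CANONICAL_ORDER)
--     return dict(sorted(raw.items(), key=lambda kv: _RANK.get(kv[0], sentinel)))
-- ===== Notes on version B (the rewrite author's own statement) =====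
-- stated objective: idiomatic
-- what changed: Replaces A's two membership-testing append loops over a growing result dict with a single stable sort of raw.items() under a precomputed rank table (unknown keys share the sentinel rank, so stability keeps their insertion order); Pre_ only states the dict representation invariant (distinct keys), which every Python dict satisfies.
import Mathlib
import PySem

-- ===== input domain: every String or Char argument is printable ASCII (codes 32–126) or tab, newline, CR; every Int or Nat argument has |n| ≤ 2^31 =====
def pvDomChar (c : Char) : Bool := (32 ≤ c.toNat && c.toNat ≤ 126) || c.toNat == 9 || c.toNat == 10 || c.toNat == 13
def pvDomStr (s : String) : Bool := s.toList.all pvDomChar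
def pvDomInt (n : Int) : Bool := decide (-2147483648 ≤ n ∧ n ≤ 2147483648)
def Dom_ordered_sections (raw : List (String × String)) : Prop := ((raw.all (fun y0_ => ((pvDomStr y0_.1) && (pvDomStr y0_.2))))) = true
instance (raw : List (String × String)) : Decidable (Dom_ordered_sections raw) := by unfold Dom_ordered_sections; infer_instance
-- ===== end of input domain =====

-- B reorders the dict with one stable sort under a precomputed rank table instead of A's two
-- membership-testing append loops; equal output on every dict (assoc list with distinct keys).


def pvCanonicalOrder : List String :=
  ["pallavi", "anupallavi", "charanam", "samashti_charanam",
   "madhyamakala", "chittaswaram", "swara_sahitya"]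

-- ===== PORT A =====
-- result = {}; for key in CANONICAL_ORDER: if key in raw: result[key] = raw[key]
-- for key, val in raw.items(): if key not in result: result[key] = val
-- (raw[key] is guarded by 'key in raw', so (get? k).getD "" returns exactly raw[key] there)
def ordered_sections (raw : List (String × String)) : List (String × String) :=
  let rawD : PySem.Dict String String := PySem.Dict.mk raw
  let res1 : PySem.Dict String String :=
    pvCanonicalOrder.foldl
      (fun res k => if rawD.contains k then res.insert k ((rawD.get? k).getD "") else res)
      PySem.Dict.empty
  let res2 : PySem.Dict String String :=
    raw.foldl (fun res kv => if res.contains kv.1 then res else res.insert kv.1 kv.2) res1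
  res2.items

-- ===== PORT B =====
-- _RANK = {name: i for i, name in enumerate(CANONICAL_ORDER)}
def pvRank : PySem.Dict String Int :=
  PySem.Dict.ofList ((PySem.List.enumerate pvCanonicalOrder).map (fun p => (p.2, p.1)))

-- return dict(sorted(raw.items(), key=lambda kv: _RANK.get(kv[0], sentinel)))  (sentinel = 7 = len)
def ordered_sections_alt (raw : List (String × String)) : List (String × String) :=
  (PySem.Dict.ofList
      (PySem.List.sorted raw (fun kv => pvRank.getD kv.1 7) false)).items

-- ===== PRECONDITION & SPEC =====
-- Pre_ states only the representation invariant of a Python dict: the association list has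
-- pairwise-distinct keys (every input reachable from Python satisfies it; a duplicate-keyed
-- assoc list corresponds to no dict argument).
def Pre_ordered_sections (raw : List (String × String)) : Prop := (raw.map Prod.fst).Nodup
instance (raw : List (String × String)) : Decidable (Pre_ordered_sections raw) := by
  unfold Pre_ordered_sections; infer_instance

def pvWitness_ordered_sections : (List (String × String)) :=
  [("charanam", "c1"), ("pallavi", "p1"), ("note", "n1")]

def Spec_ordered_sections (raw : List (String × String)) (out : List (String × String)) : Prop :=
  out = ordered_sections_alt raw
instance (raw : List (String × String)) (out : List (String × String)) :
    Decidable (Spec_ordered_sections raw out) := by unfold Spec_ordered_sections; infer_instance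

-- ===== CLAIM (what is proved, stated in full; the proofs are below) =====
def Claim_equal_ordered_sections : Prop :=
  ∀ (raw : List (String × String)), Dom_ordered_sections raw →
    Pre_ordered_sections raw → Spec_ordered_sections raw (ordered_sections raw)

-- ===== LEMMAS AND PROOFS =====

-- shorthand for B's sort key
def pvKey (kv : String × String) : Int := pvRank.getD kv.1 7

-- bucket concatenation: the elements of xs whose key is r, for r running over rs, in order
def pvBuckets (rs : List Int) (xs : List (String × String)) : List (String × String) :=
  rs.flatMap (fun r => xs.filter (fun kv => decide (pvKey kv = r)))

theorem pv_insertBy_append_left (before : (String × String) → (String × String) → Bool)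
    (x : String × String) (L1 L2 : List (String × String))
    (h : ∀ y ∈ L1, before x y = false) :
    PySem.List.insertBy before x (L1 ++ L2) = L1 ++ PySem.List.insertBy before x L2 := by
  induction L1 with
  | nil => simp
  | cons y ys ih =>
      have hy : before x y = false := h y (by simp)
      simp [PySem.List.insertBy, hy, ih (fun z hz => h z (by simp [hz]))]

theorem pv_insertBy_all_true (before : (String × String) → (String × String) → Bool)
    (x : String × String) (L : List (String × String))
    (h : ∀ y ∈ L, before x y = true) :
    PySem.List.insertBy before x L = x :: L := by
  cases L with
  | nil => rfl
  | cons y ys => simp [PySem.List.insertBy, h y (by simp)]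

theorem pvBuckets_cons (r : Int) (rs : List Int) (xs : List (String × String)) :
    pvBuckets (r :: rs) xs = xs.filter (fun kv => decide (pvKey kv = r)) ++ pvBuckets rs xs := by
  simp [pvBuckets]

theorem pv_insertBy_buckets (x : String × String) (xs : List (String × String))
    (rs : List Int) (hs : rs.Pairwise (· < ·)) (hx : pvKey x ∈ rs) :
    PySem.List.insertBy (fun a b => decide (pvKey a < pvKey b)) x (pvBuckets rs xs)
      = pvBuckets rs (xs ++ [x]) := by
  induction rs with
  | nil => simp at hx
  | cons r rest ih =>
      have hrest : ∀ r' ∈ rest, r < r' := by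
        intro r' hr'; exact (List.pairwise_cons.mp hs).1 r' hr'
      by_cases hxr : pvKey x = r
      · -- x lands at the end of bucket r; rest's buckets are untouched
        have h1 : PySem.List.insertBy (fun a b => decide (pvKey a < pvKey b)) x
            (pvBuckets (r :: rest) xs)
            = xs.filter (fun kv => decide (pvKey kv = r)) ++
              PySem.List.insertBy (fun a b => decide (pvKey a < pvKey b)) x
                (pvBuckets rest xs) := by
          simp only [pvBuckets, List.flatMap_cons]
          apply pv_insertBy_append_left
          intro y hy
          have : pvKey y = r := by simpa using (List.of_mem_filter hy)
          simp [this, hxr]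
        have h2 : PySem.List.insertBy (fun a b => decide (pvKey a < pvKey b)) x
            (pvBuckets rest xs) = x :: pvBuckets rest xs := by
          apply pv_insertBy_all_true
          intro y hy
          simp only [pvBuckets, List.mem_flatMap] at hy
          obtain ⟨r', hr', hy'⟩ := hy
          have hyk : pvKey y = r' := by simpa using (List.of_mem_filter hy')
          have h4 : r < r' := hrest r' hr'
          show decide (pvKey x < pvKey y) = true
          simp only [decide_eq_true_eq]
          omega
        have h3 : pvBuckets rest (xs ++ [x]) = pvBuckets rest xs := by
          simp only [pvBuckets]
          apply List.flatMap_congr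
          intro r' hr'
          have : ¬ (pvKey x = r') := by
            intro hcon
            have h4 : r < r' := hrest r' hr'
            omega
          simp [List.filter_append, this]
        rw [h1, h2, pvBuckets_cons, List.filter_append, h3]
        simp [hxr]
      · have hxrest : pvKey x ∈ rest := by
          rcases List.mem_cons.mp hx with h | h
          · exact absurd h hxr
          · exact h
        have h1 : PySem.List.insertBy (fun a b => decide (pvKey a < pvKey b)) x
            (pvBuckets (r :: rest) xs)
            = xs.filter (fun kv => decide (pvKey kv = r)) ++
              PySem.List.insertBy (fun a b => decide (pvKey a < pvKey b)) x
                (pvBuckets rest xs) := by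
          simp only [pvBuckets, List.flatMap_cons]
          apply pv_insertBy_append_left
          intro y hy
          have hyr : pvKey y = r := by simpa using (List.of_mem_filter hy)
          have h4 : r < pvKey x := hrest _ hxrest
          show decide (pvKey x < pvKey y) = false
          simp only [decide_eq_false_iff_not, not_lt]
          omega
        rw [h1, ih (List.Pairwise.of_cons hs) hxrest, pvBuckets_cons, List.filter_append]
        simp [hxr]

theorem pv_sorted_eq_buckets (xs : List (String × String)) (rs : List Int)
    (hs : rs.Pairwise (· < ·)) (hall : ∀ x ∈ xs, pvKey x ∈ rs) :
    PySem.List.sorted xs pvKey false = pvBuckets rs xs := by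
  induction xs using List.reverseRecOn with
  | nil => simp [PySem.List.sorted, pvBuckets]
  | append_singleton ys y ih =>
      rw [PySem.List.sorted_eq_foldl_insertBy, List.foldl_append]
      rw [← PySem.List.sorted_eq_foldl_insertBy]
      rw [ih (fun x hx => hall x (by simp [hx]))]
      simp only [List.foldl_cons, List.foldl_nil]
      exact pv_insertBy_buckets y ys rs hs (hall y (by simp))

theorem pv_rank_spec (s : String) : pvRank.getD s 7 = if s = "pallavi" then 0 else if s = "anupallavi" then 1 else if s = "charanam" then 2 else if s = "samashti_charanam" then 3 else if s = "madhyamakala" then 4 else if s = "chittaswaram" then 5 else if s = "swara_sahitya" then 6 else 7 := by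
  have e : pvRank = PySem.Dict.mk [("pallavi", (0:Int)), ("anupallavi", (1:Int)), ("charanam", (2:Int)), ("samashti_charanam", (3:Int)), ("madhyamakala", (4:Int)), ("chittaswaram", (5:Int)), ("swara_sahitya", (6:Int))] := by rfl
  rw [e]
  simp only [PySem.Dict.getD, PySem.Dict.get?, List.find?_cons]
  rcases eq_or_ne s "pallavi" with h0 | h0
  · subst h0; decide
  have b0 : ("pallavi" == s) = false := beq_eq_false_iff_ne.mpr (Ne.symm h0)
  rw [if_neg h0]
  simp only [b0]
  rcases eq_or_ne s "anupallavi" with h1 | h1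
  · subst h1; decide
  have b1 : ("anupallavi" == s) = false := beq_eq_false_iff_ne.mpr (Ne.symm h1)
  rw [if_neg h1]
  simp only [b1]
  rcases eq_or_ne s "charanam" with h2 | h2
  · subst h2; decide
  have b2 : ("charanam" == s) = false := beq_eq_false_iff_ne.mpr (Ne.symm h2)
  rw [if_neg h2]
  simp only [b2]
  rcases eq_or_ne s "samashti_charanam" with h3 | h3
  · subst h3; decide
  have b3 : ("samashti_charanam" == s) = false := beq_eq_false_iff_ne.mpr (Ne.symm h3)
  rw [if_neg h3]
  simp only [b3]
  rcases eq_or_ne s "madhyamakala" with h4 | h4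
  · subst h4; decide
  have b4 : ("madhyamakala" == s) = false := beq_eq_false_iff_ne.mpr (Ne.symm h4)
  rw [if_neg h4]
  simp only [b4]
  rcases eq_or_ne s "chittaswaram" with h5 | h5
  · subst h5; decide
  have b5 : ("chittaswaram" == s) = false := beq_eq_false_iff_ne.mpr (Ne.symm h5)
  rw [if_neg h5]
  simp only [b5]
  rcases eq_or_ne s "swara_sahitya" with h6 | h6
  · subst h6; decide
  have b6 : ("swara_sahitya" == s) = false := beq_eq_false_iff_ne.mpr (Ne.symm h6)
  rw [if_neg h6]
  simp only [b6]
  rfl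



theorem pv_filter_eq_find? (xs : List (String × String)) (k : String)
    (h : (xs.map Prod.fst).Nodup) :
    xs.filter (fun kv => decide (kv.1 = k)) = (xs.find? (fun kv => kv.1 == k)).toList := by
  induction xs with
  | nil => rfl
  | cons kv t ih =>
      simp only [List.map_cons, List.nodup_cons] at h
      by_cases hk : kv.1 = k
      · have ht : t.filter (fun kv => decide (kv.1 = k)) = [] := by
          apply List.filter_eq_nil_iff.mpr
          intro kv' hkv'
          simp only [decide_eq_true_eq]
          intro hc
          exact h.1 (by rw [hk, ← hc]; exact List.mem_map_of_mem hkv')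
        simp [hk, ht]
      · simp [hk, ih h.2]

theorem pv_phase2 (xs : List (String × String)) (d : PySem.Dict String String)
    (hx : (xs.map Prod.fst).Nodup) :
    (xs.foldl (fun res kv => if res.contains kv.1 then res else res.insert kv.1 kv.2) d).items
      = d.items ++ xs.filter (fun kv => !(d.contains kv.1)) := by
  induction xs generalizing d with
  | nil => simp
  | cons kv t ih =>
      simp only [List.map_cons, List.nodup_cons] at hx
      by_cases hc : d.contains kv.1
      · simp [List.foldl_cons, hc, ih d hx.2]
      · have hitems : (d.insert kv.1 kv.2).items = d.items ++ [kv] := by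
          rw [PySem.Dict.items_insert]
          simp [hc]
        have hfc : t.filter (fun kv' => !((d.insert kv.1 kv.2).contains kv'.1))
            = t.filter (fun kv' => !(d.contains kv'.1)) := by
          apply List.filter_congr
          intro kv' hkv'
          have hne : kv'.1 ≠ kv.1 := by
            intro hcon
            exact hx.1 (by rw [← hcon]; exact List.mem_map_of_mem hkv')
          rw [PySem.Dict.contains_insert]
          simp [hne]
        simp only [List.foldl_cons, if_neg hc]
        rw [ih _ hx.2, hitems, hfc, List.filter_cons]
        simp [hc, List.append_assoc]

theorem pv_phase1 (rawD : PySem.Dict String String) (cs : List String)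
    (d : PySem.Dict String String) (hcs : cs.Nodup)
    (hd : ∀ k ∈ cs, d.contains k = false) :
    (cs.foldl
        (fun res k => if rawD.contains k then res.insert k ((rawD.get? k).getD "") else res)
        d).items
      = d.items ++ cs.filterMap
          (fun k => if rawD.contains k then some (k, (rawD.get? k).getD "") else none) := by
  induction cs generalizing d with
  | nil => simp
  | cons k t ih =>
      simp only [List.nodup_cons] at hcs
      by_cases hr : rawD.contains k
      · have hdk : d.contains k = false := hd k (by simp)
        have hitems : (d.insert k ((rawD.get? k).getD "")).items
            = d.items ++ [(k, (rawD.get? k).getD "")] := by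
          rw [PySem.Dict.items_insert]; simp [hdk]
        have hd' : ∀ k' ∈ t, (d.insert k ((rawD.get? k).getD "")).contains k' = false := by
          intro k' hk'
          have hne : k' ≠ k := fun hcon => hcs.1 (hcon ▸ hk')
          rw [PySem.Dict.contains_insert]
          simp [hne, hd k' (by simp [hk'])]
        simp only [List.foldl_cons, if_pos hr]
        rw [ih _ hcs.2 hd', hitems, List.filterMap_cons, if_pos hr]
        simp [List.append_assoc]
      · simp only [List.foldl_cons, List.filterMap_cons, if_neg hr]
        exact ih d hcs.2 (fun k' hk' => hd k' (by simp [hk']))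

theorem pv_update_items (ps : List (String × String)) (d : PySem.Dict String String)
    (hps : (ps.map Prod.fst).Nodup) (hd : ∀ k ∈ ps.map Prod.fst, d.contains k = false) :
    (d.update ps).items = d.items ++ ps := by
  induction ps generalizing d with
  | nil => simp [PySem.Dict.update]
  | cons kv t ih =>
      simp only [List.map_cons, List.nodup_cons] at hps
      have hdk : d.contains kv.1 = false := hd kv.1 (by simp)
      have hitems : (d.insert kv.1 kv.2).items = d.items ++ [kv] := by
        rw [PySem.Dict.items_insert]; simp [hdk]
      have hd' : ∀ k' ∈ t.map Prod.fst, (d.insert kv.1 kv.2).contains k' = false := by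
        intro k' hk'
        have hne : k' ≠ kv.1 := fun hcon => hps.1 (hcon ▸ hk')
        rw [PySem.Dict.contains_insert]
        simp [hne, hd k' (by simp [hk'])]
      simp only [PySem.Dict.update, List.foldl_cons]
      have := ih (d.insert kv.1 kv.2) hps.2 hd'
      simp only [PySem.Dict.update] at this
      rw [this, hitems]
      simp [List.append_assoc]

theorem pv_ofList_items (ps : List (String × String)) (h : (ps.map Prod.fst).Nodup) :
    (PySem.Dict.ofList ps).items = ps := by
  have := pv_update_items ps PySem.Dict.empty h (by intro k _; rfl)
  simpa [PySem.Dict.ofList] using this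

-- keys of pvRank (as membership in canonical order)
theorem pv_key_mem (kv : String × String) : pvKey kv ∈ ([0,1,2,3,4,5,6,7] : List Int) := by
  have := pv_rank_spec kv.1
  simp only [pvKey]
  rw [this]
  split_ifs <;> simp






theorem pv_filterMap_toList {α β : Type} (f : α → Option β) (a : α) (l : List α) :
    List.filterMap f (a :: l) = (f a).toList ++ List.filterMap f l := by
  cases hfa : f a <;> simp [hfa]

theorem pv_find_toList (raw : List (String × String)) (k : String) :
    (raw.find? (fun kv => kv.1 == k)).toList
      = if (PySem.Dict.mk raw).contains k
        then [(k, ((PySem.Dict.mk raw).get? k).getD "")] else [] := by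
  cases hf : raw.find? (fun kv => kv.1 == k) with
  | none =>
      have hc : (PySem.Dict.mk raw).contains k = false := by
        simp only [PySem.Dict.contains, List.any_eq_false]
        intro p hp
        have := List.find?_eq_none.mp hf p hp
        simpa using this
      simp [hc]
  | some p =>
      have hp1 : p.1 = k := by simpa using List.find?_some hf
      have hpmem : p ∈ raw := List.mem_of_find?_eq_some hf
      have hc : (PySem.Dict.mk raw).contains k = true := by
        simp only [PySem.Dict.contains, List.any_eq_true]
        exact ⟨p, hpmem, by simp [hp1]⟩
      have hg : (PySem.Dict.mk raw).get? k = some p.2 := by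
        simp [PySem.Dict.get?, hf]
      subst hp1
      simp [hc, hg]


theorem pv_key_iff (name : String) (i : Int) (hni : pvRank.getD name 7 = i)
    (hinj : ∀ s, pvRank.getD s 7 = i → s = name) (kv : String × String) :
    (pvKey kv = i) ↔ kv.1 = name :=
  ⟨fun h => hinj _ h, fun h => by simp only [pvKey, h, hni]⟩

theorem pv_bucket (raw : List (String × String)) (hpre : (raw.map Prod.fst).Nodup)
    (name : String) (i : Int) (hni : pvRank.getD name 7 = i)
    (hinj : ∀ s, pvRank.getD s 7 = i → s = name) :
    raw.filter (fun kv => decide (pvKey kv = i))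
      = if raw.any (fun p => p.1 == name)
        then [(name, ((PySem.Dict.mk raw).get? name).getD "")] else [] := by
  have h1 : raw.filter (fun kv => decide (pvKey kv = i))
      = raw.filter (fun kv => decide (kv.1 = name)) := by
    apply List.filter_congr
    intro kv _
    simp only [decide_eq_decide]
    exact pv_key_iff name i hni hinj kv
  rw [h1, pv_filter_eq_find? raw name hpre, pv_find_toList]
  simp [PySem.Dict.contains]


theorem pv_bucket0 (raw : List (String × String)) (hpre : (raw.map Prod.fst).Nodup) :
    raw.filter (fun kv => decide (pvKey kv = 0))
      = if raw.any (fun p => p.1 == "pallavi")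
        then [("pallavi", ((PySem.Dict.mk raw).get? "pallavi").getD "")] else [] := by
  apply pv_bucket raw hpre "pallavi" 0 (by decide)
  intro s h
  rw [pv_rank_spec] at h
  split_ifs at h <;> first | assumption | exact absurd h (by decide)


theorem pv_bucket1 (raw : List (String × String)) (hpre : (raw.map Prod.fst).Nodup) :
    raw.filter (fun kv => decide (pvKey kv = 1))
      = if raw.any (fun p => p.1 == "anupallavi")
        then [("anupallavi", ((PySem.Dict.mk raw).get? "anupallavi").getD "")] else [] := by
  apply pv_bucket raw hpre "anupallavi" 1 (by decide)
  intro s h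
  rw [pv_rank_spec] at h
  split_ifs at h <;> first | assumption | exact absurd h (by decide)


theorem pv_bucket2 (raw : List (String × String)) (hpre : (raw.map Prod.fst).Nodup) :
    raw.filter (fun kv => decide (pvKey kv = 2))
      = if raw.any (fun p => p.1 == "charanam")
        then [("charanam", ((PySem.Dict.mk raw).get? "charanam").getD "")] else [] := by
  apply pv_bucket raw hpre "charanam" 2 (by decide)
  intro s h
  rw [pv_rank_spec] at h
  split_ifs at h <;> first | assumption | exact absurd h (by decide)


theorem pv_bucket3 (raw : List (String × String)) (hpre : (raw.map Prod.fst).Nodup) :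
    raw.filter (fun kv => decide (pvKey kv = 3))
      = if raw.any (fun p => p.1 == "samashti_charanam")
        then [("samashti_charanam", ((PySem.Dict.mk raw).get? "samashti_charanam").getD "")] else [] := by
  apply pv_bucket raw hpre "samashti_charanam" 3 (by decide)
  intro s h
  rw [pv_rank_spec] at h
  split_ifs at h <;> first | assumption | exact absurd h (by decide)


theorem pv_bucket4 (raw : List (String × String)) (hpre : (raw.map Prod.fst).Nodup) :
    raw.filter (fun kv => decide (pvKey kv = 4))
      = if raw.any (fun p => p.1 == "madhyamakala")
        then [("madhyamakala", ((PySem.Dict.mk raw).get? "madhyamakala").getD "")] else [] := by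
  apply pv_bucket raw hpre "madhyamakala" 4 (by decide)
  intro s h
  rw [pv_rank_spec] at h
  split_ifs at h <;> first | assumption | exact absurd h (by decide)


theorem pv_bucket5 (raw : List (String × String)) (hpre : (raw.map Prod.fst).Nodup) :
    raw.filter (fun kv => decide (pvKey kv = 5))
      = if raw.any (fun p => p.1 == "chittaswaram")
        then [("chittaswaram", ((PySem.Dict.mk raw).get? "chittaswaram").getD "")] else [] := by
  apply pv_bucket raw hpre "chittaswaram" 5 (by decide)
  intro s h
  rw [pv_rank_spec] at h
  split_ifs at h <;> first | assumption | exact absurd h (by decide)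


theorem pv_bucket6 (raw : List (String × String)) (hpre : (raw.map Prod.fst).Nodup) :
    raw.filter (fun kv => decide (pvKey kv = 6))
      = if raw.any (fun p => p.1 == "swara_sahitya")
        then [("swara_sahitya", ((PySem.Dict.mk raw).get? "swara_sahitya").getD "")] else [] := by
  apply pv_bucket raw hpre "swara_sahitya" 6 (by decide)
  intro s h
  rw [pv_rank_spec] at h
  split_ifs at h <;> first | assumption | exact absurd h (by decide)


theorem pv_key_seven_iff (kv : String × String) :
    (pvKey kv = 7) ↔ kv.1 ∉ pvCanonicalOrder := by
  simp only [pvKey]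
  rw [pv_rank_spec]
  split_ifs with h0 h1 h2 h3 h4 h5 h6 <;> simp_all [pvCanonicalOrder]

theorem pv_rest (raw : List (String × String)) :
    raw.filter (fun kv =>
        !((pvCanonicalOrder.filterMap (fun k =>
            if (PySem.Dict.mk raw).contains k
            then some (k, ((PySem.Dict.mk raw).get? k).getD "") else none)).any
          (fun p => p.1 == kv.1)))
      = raw.filter (fun kv => decide (pvKey kv = 7)) := by
  apply List.filter_congr
  intro kv hkv
  have hrawc : (PySem.Dict.mk raw).contains kv.1 = true := by
    simp only [PySem.Dict.contains, List.any_eq_true]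
    exact ⟨kv, hkv, by simp⟩
  by_cases hm : kv.1 ∈ pvCanonicalOrder
  · have hany : ((pvCanonicalOrder.filterMap (fun k =>
        if (PySem.Dict.mk raw).contains k
        then some (k, ((PySem.Dict.mk raw).get? k).getD "") else none)).any
          (fun p => p.1 == kv.1)) = true := by
      simp only [List.any_eq_true]
      refine ⟨(kv.1, ((PySem.Dict.mk raw).get? kv.1).getD ""), ?_, by simp⟩
      exact List.mem_filterMap.mpr ⟨kv.1, hm, by simp [hrawc]⟩
    have hk7 : ¬ (pvKey kv = 7) := fun h => (pv_key_seven_iff kv).mp h hm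
    simp only [hany, Bool.not_true]
    exact (decide_eq_false hk7).symm
  · have hany : ((pvCanonicalOrder.filterMap (fun k =>
        if (PySem.Dict.mk raw).contains k
        then some (k, ((PySem.Dict.mk raw).get? k).getD "") else none)).any
          (fun p => p.1 == kv.1)) = false := by
      simp only [List.any_eq_false]
      intro p hp
      obtain ⟨a, ha, hfa⟩ := List.mem_filterMap.mp hp
      have hpa : p.1 = a := by
        by_cases hca : (PySem.Dict.mk raw).contains a
        · simp [hca] at hfa; rw [← hfa]
        · simp [hca] at hfa
      simp only [beq_iff_eq, hpa]
      intro hcon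
      exact hm (hcon ▸ ha)
    have hk7 : pvKey kv = 7 := (pv_key_seven_iff kv).mpr hm
    simp only [hany, Bool.not_false]
    exact (decide_eq_true hk7).symm


-- ===== VERDICT (by name: the statement is the Claim_ definition above) =====
theorem ordered_sections_spec : Claim_equal_ordered_sections := by
  intro raw _ hpre
  unfold Spec_ordered_sections
  -- B's side: the built dict is the sorted list itself, which is the bucket concatenation
  have hperm : (PySem.List.sorted raw pvKey false).Perm raw := PySem.List.sorted_perm raw pvKey false
  have hnodup : ((PySem.List.sorted raw pvKey false).map Prod.fst).Nodup :=
    ((hperm.map Prod.fst).nodup_iff).mpr hpre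
  have hB : ordered_sections_alt raw = pvBuckets [0, 1, 2, 3, 4, 5, 6, 7] raw := by
    show (PySem.Dict.ofList (PySem.List.sorted raw pvKey false)).items = _
    rw [pv_ofList_items _ hnodup]
    exact pv_sorted_eq_buckets raw [0, 1, 2, 3, 4, 5, 6, 7] (by decide) (fun x _ => pv_key_mem x)
  rw [hB]
  -- A's side: unfold the two folds
  show (raw.foldl (fun res kv => if res.contains kv.1 then res else res.insert kv.1 kv.2)
      (pvCanonicalOrder.foldl
        (fun res k => if (PySem.Dict.mk raw).contains k
          then res.insert k (((PySem.Dict.mk raw).get? k).getD "") else res)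
        PySem.Dict.empty)).items = _
  rw [pv_phase2 raw _ hpre]
  have hp1 := pv_phase1 (PySem.Dict.mk raw) pvCanonicalOrder PySem.Dict.empty (by decide)
    (fun k _ => rfl)
  have hrest := pv_rest raw
  have hb0 := pv_bucket0 raw hpre
  have hb1 := pv_bucket1 raw hpre
  have hb2 := pv_bucket2 raw hpre
  have hb3 := pv_bucket3 raw hpre
  have hb4 := pv_bucket4 raw hpre
  have hb5 := pv_bucket5 raw hpre
  have hb6 := pv_bucket6 raw hpre
  simp only [PySem.Dict.contains] at hp1 hrest ⊢
  simp only [hp1]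
  simp only [PySem.Dict.empty, List.nil_append]
  rw [hrest]
  simp only [pvCanonicalOrder, pv_filterMap_toList, List.filterMap_nil]
  simp only [apply_ite (Option.toList), Option.toList_some, Option.toList_none]
  simp only [pvBuckets, List.flatMap_cons, List.flatMap_nil]
  rw [hb0, hb1, hb2, hb3, hb4, hb5, hb6]
  simp only [List.append_assoc, List.append_nil]
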